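-- pv_equiv track=rewrite | github.com/Marco-Syntax/KiForKids | kernal/tools/module_inspector.py | get_functions_info
-- ===== SOURCE A (Python) =====
-- def get_functions_info(lines):
--     """
--     Iterates through lines to find all function definitions.
--     For each function, collects any decorators that immediately precede it.
--     Returns a list of strings with the function signature and its decorators if available.
--     """
--     functions = []
--     i = 0
--     total_lines = len(lines)
--     while i < total_lines:
--         line = lines[i]
--         stripped = line.lstrip()
--         # Check if the line is a function definition.
--         if stripped.startswith("def "):
--             # Backtrack to collect preceding decorators.
--             decorators = []
--             j = i - 1
--             while j >= 0:
--                 prev_line = lines[j].strip()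
--                 if prev_line == "":
--                     j -= 1
--                     continue
--                 if prev_line.startswith("@"):
--                     decorators.insert(0, prev_line)
--                     j -= 1
--                 else:
--                     break
--             # Clean the function signature by stripping trailing whitespace
--             func_signature = stripped.rstrip()
--             if decorators:
--                 func_info = f"{func_signature}  # Decorators: " + ", ".join(decorators)
--             else:
--                 func_info = func_signature
--             functions.append(func_info)
--         i += 1
--     return functions
-- ===== SOURCE B (Python) =====
-- def get_functions_info(lines):
--     """One forward pass: maintain the decorators pending since the last reset."""
--     functions = []
--     pending = []
--     for line in lines:
--         s = line.strip()
--         if line.lstrip().startswith("def "):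
--             sig = line.lstrip().rstrip()
--             if pending:
--                 functions.append(sig + "  # Decorators: " + ", ".join(pending))
--             else:
--                 functions.append(sig)
--             pending = []
--         elif s == "":
--             pass
--         elif s.startswith("@"):
--             pending.append(s)
--         else:
--             pending = []
--     return functions
-- ===== Notes on version B (the rewrite author's own statement) =====
-- stated objective: simpler
-- what changed: Replaces A's per-def backward scan over all preceding lines with a single forward pass that carries a pending list of decorators, emitting and resetting it at each def line.
import Mathlib
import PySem

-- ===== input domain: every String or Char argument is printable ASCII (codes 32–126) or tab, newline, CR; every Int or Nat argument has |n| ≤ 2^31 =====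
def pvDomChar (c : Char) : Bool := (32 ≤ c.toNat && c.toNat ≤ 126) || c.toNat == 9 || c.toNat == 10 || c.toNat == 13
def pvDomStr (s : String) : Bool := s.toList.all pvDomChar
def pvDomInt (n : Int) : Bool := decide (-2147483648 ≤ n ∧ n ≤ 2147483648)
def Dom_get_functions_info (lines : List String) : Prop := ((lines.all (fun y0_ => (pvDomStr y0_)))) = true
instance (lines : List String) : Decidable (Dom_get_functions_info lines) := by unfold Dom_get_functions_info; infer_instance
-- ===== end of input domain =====

-- B replaces A's per-def backward scan over earlier lines by a single forward pass
-- carrying the pending decorators (objective: simpler; same return value proved equal).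

-- ===== PORT A =====
-- A's inner `while j >= 0` backtrack: pvDecos lines i runs j = i-1, i-2, … (decorators.insert(0, prev) = append after the recursive call on lower j).
def pvDecos (lines : List String) : Nat → List String
  | 0 => []
  | j + 1 =>
    let prev := PySem.Str.strip (lines.getD j "")
    if prev = "" then pvDecos lines j
    else if PySem.Str.startswith prev "@" then pvDecos lines j ++ [prev]
    else []

-- A's outer `while i < total_lines` loop, fuel n = total_lines - i.
def pvMain (lines : List String) (i : Nat) : Nat → List String
  | 0 => []
  | n + 1 =>
    let line := lines.getD i ""
    let stripped := PySem.Str.lstrip line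
    if PySem.Str.startswith stripped "def " then
      let decorators := pvDecos lines i
      let func_signature := PySem.Str.rstrip stripped
      let func_info :=
        if decorators.isEmpty then func_signature
        else func_signature ++ "  # Decorators: " ++ PySem.Str.join ", " decorators
      func_info :: pvMain lines (i + 1) n
    else pvMain lines (i + 1) n

def get_functions_info (lines : List String) : List String :=
  pvMain lines 0 lines.length

-- ===== PORT B =====
def pvAltLoop : List String → List String → List String
  | [], _ => []
  | line :: rest, pending =>
    let s := PySem.Str.strip line
    if PySem.Str.startswith (PySem.Str.lstrip line) "def " then
      let sig := PySem.Str.rstrip (PySem.Str.lstrip line)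
      let info :=
        if pending.isEmpty then sig
        else sig ++ "  # Decorators: " ++ PySem.Str.join ", " pending
      info :: pvAltLoop rest []
    else if s = "" then pvAltLoop rest pending
    else if PySem.Str.startswith s "@" then pvAltLoop rest (pending ++ [s])
    else pvAltLoop rest []

def get_functions_info_alt (lines : List String) : List String :=
  pvAltLoop lines []

-- ===== PRECONDITION & SPEC =====
def Spec_get_functions_info (lines : List String) (out : List String) : Prop := out = get_functions_info_alt lines
instance (lines : List String) (out : List String) : Decidable (Spec_get_functions_info lines out) := by unfold Spec_get_functions_info; infer_instance

-- ===== CLAIM (what is proved, stated in full; the proofs are below) =====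
def Claim_equal_get_functions_info : Prop := ∀ (lines : List String), Dom_get_functions_info lines → Spec_get_functions_info lines (get_functions_info lines)

-- ===== LEMMAS AND PROOFS =====

theorem pv_getD_append_cons (p : List String) (x : String) (r : List String) (d : String) :
    (p ++ x :: r).getD p.length d = x := by
  induction p with
  | nil => rfl
  | cons a p ih => simpa using ih

-- a non-space head survives rstrip
theorem pv_rstrip_cons_of_not_space (c : Char) (t : List Char) (hc : PySem.Chars.isspace c = false) :
    PySem.Chars.rstrip (c :: t) = c :: PySem.Chars.rstrip t := by
  unfold PySem.Chars.rstrip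
  rw [List.reverse_cons, List.dropWhile_append]
  by_cases h : (t.reverse.dropWhile PySem.Chars.isspace).isEmpty
  · simp [h, hc, List.isEmpty_iff.mp h]
  · simp [h]

-- a line whose lstrip starts with "def " has a strip beginning with 'd'
theorem pv_strip_of_def (line : String)
    (h : PySem.Str.startswith (PySem.Str.lstrip line) "def " = true) :
    ∃ t, (PySem.Str.strip line).toList = 'd' :: t := by
  have h' : PySem.Chars.startswith (PySem.Chars.lstrip line.toList) ("def ".toList) = true := by
    simpa [PySem.Str.startswith, PySem.Str.lstrip] using h
  have hpre : ("def ".toList) <+: PySem.Chars.lstrip line.toList :=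
    (PySem.Chars.startswith_iff _ _).mp h'
  obtain ⟨u, hu⟩ := hpre
  have hs : (PySem.Str.strip line).toList
      = PySem.Chars.rstrip (PySem.Chars.lstrip line.toList) := by
    simp [PySem.Str.strip, PySem.Chars.strip, PySem.Str.lstrip]
  rw [hs, ← hu]
  show ∃ t, PySem.Chars.rstrip ('d' :: 'e' :: 'f' :: ' ' :: u) = 'd' :: t
  rw [pv_rstrip_cons_of_not_space 'd' _ (by decide)]
  exact ⟨_, rfl⟩

theorem pv_def_strip_ne (line : String)
    (h : PySem.Str.startswith (PySem.Str.lstrip line) "def " = true) :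
    ¬ PySem.Str.strip line = "" := by
  obtain ⟨t, ht⟩ := pv_strip_of_def line h
  intro he
  rw [he] at ht
  simp at ht

theorem pv_def_strip_not_at (line : String)
    (h : PySem.Str.startswith (PySem.Str.lstrip line) "def " = true) :
    PySem.Str.startswith (PySem.Str.strip line) "@" = false := by
  obtain ⟨t, ht⟩ := pv_strip_of_def line h
  simp [PySem.Str.startswith, ht, PySem.Chars.startswith, List.isPrefixOf]

theorem pv_main_eq (rest : List String) : ∀ (p : List String),
    pvMain (p ++ rest) p.length rest.length
      = pvAltLoop rest (pvDecos (p ++ rest) p.length) := by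
  induction rest with
  | nil => intro p; rfl
  | cons line rest' ih =>
    intro p
    have hget : (p ++ line :: rest').getD p.length "" = line := pv_getD_append_cons p line rest' ""
    have hlen : (p ++ [line]).length = p.length + 1 := by simp
    have happ : (p ++ [line]) ++ rest' = p ++ line :: rest' := by simp
    have ih' : pvMain (p ++ line :: rest') (p.length + 1) rest'.length
        = pvAltLoop rest' (pvDecos (p ++ line :: rest') (p.length + 1)) := by
      have := ih (p ++ [line])
      rwa [hlen, happ] at this
    have hdec : pvDecos (p ++ line :: rest') (p.length + 1)
        = (let prev := PySem.Str.strip line;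
           if prev = "" then pvDecos (p ++ line :: rest') p.length
           else if PySem.Str.startswith prev "@" then
             pvDecos (p ++ line :: rest') p.length ++ [prev]
           else []) := by
      rw [pvDecos]; rw [hget]
    rw [List.length_cons, pvMain, hget, pvAltLoop]
    by_cases hdef : PySem.Str.startswith (PySem.Str.lstrip line) "def " = true
    · have hne := pv_def_strip_ne line hdef
      have hat := pv_def_strip_not_at line hdef
      simp only [hdef, if_pos, ih', hdec, hne, hat, if_false, Bool.false_eq_true]
    · simp only [Bool.not_eq_true] at hdef
      simp only [hdef, Bool.false_eq_true, if_false, ih', hdec]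
      split_ifs <;> rfl

-- ===== VERDICT (by name: the statement is the Claim_ definition above) =====
theorem get_functions_info_spec : Claim_equal_get_functions_info := by
  intro lines _
  have h := pv_main_eq lines []
  simpa [Spec_get_functions_info, get_functions_info, get_functions_info_alt, pvDecos] using h
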